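-- pv_equiv track=rewrite | github.com/deadman96385/PatchDoctor | patchdoctor.py | _split_patch_by_size
-- ===== SOURCE A (Python) =====
-- from typing import Any, Dict, List, Optional, Tuple, Union
--
-- def _split_patch_by_file(patch_content: str) -> List[str]:
--     """Split patch by individual files."""
--     patches = []
--     lines = patch_content.split('\n')
--
--     # Find header (everything before first diff --git)
--     header = []
--     diff_start = -1
--     for i, line in enumerate(lines):
--         if line.startswith('diff --git'):
--             diff_start = i
--             break
--         header.append(line)
--
--     if diff_start == -1:
--         # No diff --git found, return original
--         return [patch_content]
--
--     # Split by diff --git sections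
--     current_diff = []
--     for i in range(diff_start, len(lines)):
--         line = lines[i]
--         if line.startswith('diff --git') and current_diff:
--             # Start of new file, save current diff with header
--             patch = '\n'.join(header + current_diff)
--             patches.append(patch)
--             current_diff = [line]
--         else:
--             current_diff.append(line)
--
--     # Add the last patch
--     if current_diff:
--         patch = '\n'.join(header + current_diff)
--         patches.append(patch)
--
--     return patches
--
-- def _split_patch_by_hunk(patch_content: str) -> List[str]:
--     """Split patch by individual hunks."""
--     patches = []
--     lines = patch_content.split('\n')
--     current_file_header = []
--     current_hunk = []
--
--     for line in lines:
--         if line.startswith('diff --git') or line.startswith('---') or line.startswith('+++'):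
--             current_file_header.append(line)
--         elif line.startswith('@@'):
--             # Start of new hunk
--             if current_hunk:
--                 # Save previous hunk with file header
--                 patch = '\n'.join(current_file_header + current_hunk)
--                 patches.append(patch)
--             current_hunk = [line]
--         elif current_hunk:  # We're in a hunk
--             current_hunk.append(line)
--
--     # Add the last hunk
--     if current_hunk:
--         patch = '\n'.join(current_file_header + current_hunk)
--         patches.append(patch)
--
--     return patches
--
-- def _split_patch_by_size(patch_content: str, max_size: int = 50000) -> List[str]:
--     """Split patch by size (bytes)."""
--     if len(patch_content) <= max_size:
--         return [patch_content]
--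
--     # Try to split by file first
--     file_patches = _split_patch_by_file(patch_content)
--
--     # If files are still too large, split by hunk
--     result_patches = []
--     for file_patch in file_patches:
--         if len(file_patch) <= max_size:
--             result_patches.append(file_patch)
--         else:
--             hunk_patches = _split_patch_by_hunk(file_patch)
--             result_patches.extend(hunk_patches)
--
--     return result_patches
-- ===== SOURCE B (Python) =====
-- def _by_file(patch_content):
--     lines = patch_content.split('\n')
--     marks = [i for i, l in enumerate(lines) if l.startswith('diff --git')]
--     if not marks:
--         return [patch_content]
--     header = [l for i, l in enumerate(lines) if i < marks[0]]
--     ends = marks[1:] + [len(lines)]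
--     return ['\n'.join(header + [l for i, l in enumerate(lines) if s <= i < e])
--             for s, e in zip(marks, ends)]
--
--
-- def _is_hdr(l):
--     return l.startswith('diff --git') or l.startswith('---') or l.startswith('+++')
--
--
-- def _by_hunk(patch_content):
--     lines = patch_content.split('\n')
--     marks = [i for i, l in enumerate(lines) if l.startswith('@@')]
--     ends = marks[1:] + [len(lines)]
--     return ['\n'.join([l for i, l in enumerate(lines) if i < e and _is_hdr(l)]
--                       + [l for i, l in enumerate(lines) if s <= i < e and not _is_hdr(l)])
--             for s, e in zip(marks, ends)]
--
--
-- def _split_patch_by_size(patch_content, max_size=50000):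
--     if len(patch_content) <= max_size:
--         return [patch_content]
--     parts = []
--     for fp in _by_file(patch_content):
--         parts.extend([fp] if len(fp) <= max_size else _by_hunk(fp))
--     return parts
-- ===== Notes on version B (the rewrite author's own statement) =====
-- stated objective: alternative
-- what changed: The by-file and by-hunk splitters replace A's incremental current_diff/current_hunk accumulator loops with a one-pass collection of boundary-line indices followed by index-interval selection over the enumerated lines (the by-hunk growing header becomes a 'header lines before the segment end' selection); the size-gated orchestration is unchanged.
import Mathlib
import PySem

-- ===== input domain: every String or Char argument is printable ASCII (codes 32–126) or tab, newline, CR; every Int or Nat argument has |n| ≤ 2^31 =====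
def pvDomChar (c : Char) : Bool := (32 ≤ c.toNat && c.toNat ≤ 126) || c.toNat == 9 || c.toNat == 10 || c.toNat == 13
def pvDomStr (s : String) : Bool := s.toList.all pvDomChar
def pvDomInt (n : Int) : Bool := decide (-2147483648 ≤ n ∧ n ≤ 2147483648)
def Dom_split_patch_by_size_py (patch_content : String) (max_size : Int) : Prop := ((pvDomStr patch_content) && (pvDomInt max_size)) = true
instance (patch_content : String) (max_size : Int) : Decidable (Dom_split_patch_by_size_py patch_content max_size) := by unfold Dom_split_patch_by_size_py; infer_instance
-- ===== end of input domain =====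

-- B replaces A's incremental current_diff/current_hunk accumulator loops by a one-pass
-- collection of boundary-line indices followed by index-interval selection (alternative
-- decomposition, same cost); the size-gated orchestration is unchanged.

-- ===== PORT A =====

-- s.split('\n')  (sep nonempty, so split? is always some; shared by both ports)
def pvLines (s : String) : List String := (PySem.Str.split? s "\n").getD []

-- line.startswith('diff --git')
def pvIsDiff (l : String) : Bool := PySem.Str.startswith l "diff --git"
-- line.startswith('@@')
def pvIsAt (l : String) : Bool := PySem.Str.startswith l "@@"
-- header-line test used by _split_patch_by_hunk
def pvIsHdr (l : String) : Bool :=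
  PySem.Str.startswith l "diff --git" || PySem.Str.startswith l "---" || PySem.Str.startswith l "+++"

-- A's first loop in _split_patch_by_file: collect header lines, break at first 'diff --git'
def pvHeaderScanA : List String → List String × Option (List String)
  | [] => ([], none)
  | l :: ls =>
    if pvIsDiff l then ([], some (l :: ls))
    else
      let r := pvHeaderScanA ls
      (l :: r.1, r.2)

-- A's second loop in _split_patch_by_file over lines[diff_start:]
def pvFileLoopA (header : List String) : List String → List String → List String → List String
  | patches, current, [] =>
      if current.isEmpty then patches
      else patches ++ [PySem.Str.join "\n" (header ++ current)]
  | patches, current, l :: rest =>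
      if pvIsDiff l && !current.isEmpty then
        pvFileLoopA header (patches ++ [PySem.Str.join "\n" (header ++ current)]) [l] rest
      else
        pvFileLoopA header patches (current ++ [l]) rest

def pvByFileA (patch_content : String) : List String :=
  let lines := pvLines patch_content
  match pvHeaderScanA lines with
  | (_, none) => [patch_content]
  | (header, some rest) => pvFileLoopA header [] [] rest

-- A's loop in _split_patch_by_hunk: state (patches, current_file_header, current_hunk)
def pvHunkLoopA : List String → List String → List String → List String → List String
  | patches, fhdr, cur, [] =>
      if cur.isEmpty then patches
      else patches ++ [PySem.Str.join "\n" (fhdr ++ cur)]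
  | patches, fhdr, cur, l :: rest =>
      if pvIsHdr l then pvHunkLoopA patches (fhdr ++ [l]) cur rest
      else if pvIsAt l then
        pvHunkLoopA
          (if cur.isEmpty then patches else patches ++ [PySem.Str.join "\n" (fhdr ++ cur)])
          fhdr [l] rest
      else if !cur.isEmpty then pvHunkLoopA patches fhdr (cur ++ [l]) rest
      else pvHunkLoopA patches fhdr cur rest

def pvByHunkA (patch_content : String) : List String :=
  pvHunkLoopA [] [] [] (pvLines patch_content)

def split_patch_by_size_py (patch_content : String) (max_size : Int) : List String :=
  if (PySem.Str.len patch_content : Int) ≤ max_size then [patch_content]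
  else
    (pvByFileA patch_content).foldl
      (fun acc fp =>
        if (PySem.Str.len fp : Int) ≤ max_size then acc ++ [fp]
        else acc ++ pvByHunkA fp) []

-- ===== PORT B =====

-- [i for i, l in enumerate(lines) if p(l)]
def pvMarksB (p : String → Bool) (lines : List String) : List Int :=
  ((PySem.List.enumerate lines).filter (fun q => p q.2)).map (·.1)

def pvByFileB (patch_content : String) : List String :=
  let lines := pvLines patch_content
  let marks := pvMarksB pvIsDiff lines
  match marks with
  | [] => [patch_content]
  | m0 :: ms =>
    let header := ((PySem.List.enumerate lines).filter (fun q => decide (q.1 < m0))).map (·.2)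
    let ends := ms ++ [(lines.length : Int)]
    ((m0 :: ms).zip ends).map (fun se =>
      PySem.Str.join "\n"
        (header ++ ((PySem.List.enumerate lines).filter
            (fun q => decide (se.1 ≤ q.1) && decide (q.1 < se.2))).map (·.2)))

def pvByHunkB (patch_content : String) : List String :=
  let lines := pvLines patch_content
  let marks := pvMarksB pvIsAt lines
  let ends := marks.tail ++ [(lines.length : Int)]
  (marks.zip ends).map (fun se =>
    PySem.Str.join "\n"
      (((PySem.List.enumerate lines).filter (fun q => decide (q.1 < se.2) && pvIsHdr q.2)).map (·.2) ++
       ((PySem.List.enumerate lines).filter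
          (fun q => decide (se.1 ≤ q.1) && decide (q.1 < se.2) && !pvIsHdr q.2)).map (·.2)))

def split_patch_by_size_py_alt (patch_content : String) (max_size : Int) : List String :=
  if (PySem.Str.len patch_content : Int) ≤ max_size then [patch_content]
  else
    (pvByFileB patch_content).foldl
      (fun parts fp =>
        parts ++ (if (PySem.Str.len fp : Int) ≤ max_size then [fp] else pvByHunkB fp)) []

-- ===== PRECONDITION & SPEC =====
def Spec_split_patch_by_size_py (patch_content : String) (max_size : Int) (out : List String) : Prop := out = split_patch_by_size_py_alt patch_content max_size
instance (patch_content : String) (max_size : Int) (out : List String) : Decidable (Spec_split_patch_by_size_py patch_content max_size out) := by unfold Spec_split_patch_by_size_py; infer_instance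

-- ===== CLAIM (what is proved, stated in full; the proofs are below) =====
def Claim_equal_split_patch_by_size_py : Prop := ∀ (patch_content : String) (max_size : Int), Dom_split_patch_by_size_py patch_content max_size → Spec_split_patch_by_size_py patch_content max_size (split_patch_by_size_py patch_content max_size)

-- ===== LEMMAS AND PROOFS =====

-- a line starting with '@@' starts with none of the header prefixes
lemma pvIsAt_not_hdr (l : String) (h : pvIsAt l = true) : pvIsHdr l = false := by
  unfold pvIsAt at h
  unfold pvIsHdr
  rw [PySem.Str.startswith_eq, PySem.Chars.startswith_iff] at h
  obtain ⟨t, ht⟩ := h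
  simp only [PySem.Str.startswith_eq, Bool.or_eq_false_iff]
  refine ⟨⟨?_, ?_⟩, ?_⟩ <;>
  · rw [← Bool.not_eq_true, PySem.Chars.startswith_iff]
    intro hp
    obtain ⟨u, hu⟩ := hp
    have := ht.trans hu.symm
    simp at this

-- maximal chunks of `lines`, each starting at a p-line (proof-only decomposition)
def pvChunks (p : String → Bool) : List String → List (List String)
  | [] => []
  | l :: ls =>
      (l :: ls.takeWhile (fun x => !p x)) :: pvChunks p (ls.dropWhile (fun x => !p x))
  termination_by xs => xs.length
  decreasing_by
    exact Nat.lt_succ_of_le (List.length_dropWhile_le _ _)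

def pvShaped (p : String → Bool) (cs : List (List String)) : Prop :=
  ∀ c ∈ cs, ∃ h t, c = h :: t ∧ p h = true ∧ ∀ x ∈ t, p x = false

lemma pvChunks_flatten (p : String → Bool) : ∀ xs, (pvChunks p xs).flatten = xs := by
  intro xs
  induction xs using pvChunks.induct p with
  | case1 => simp [pvChunks]
  | case2 l ls ih =>
    rw [pvChunks]
    simp only [List.flatten_cons, ih]
    simp [List.takeWhile_append_dropWhile]

lemma pvChunks_shaped (p : String → Bool) : ∀ xs, (∀ l ls, xs = l :: ls → p l = true) →
    pvShaped p (pvChunks p xs) := by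
  intro xs
  induction xs using pvChunks.induct p with
  | case1 => intro _; simp [pvChunks, pvShaped]
  | case2 l ls ih =>
    intro hhd
    rw [pvChunks]
    intro c hc
    rcases List.mem_cons.mp hc with h | h
    · refine ⟨l, ls.takeWhile (fun x => !p x), h, hhd l ls rfl, ?_⟩
      intro x hx
      have := List.mem_takeWhile_imp hx
      simpa using this
    · refine ih ?_ c h
      intro a as ha
      have : ¬ (!p a) = true := by
        have := List.head?_dropWhile_not (fun x => !p x) ls
        rw [ha] at this
        simpa using this
      simpa using this

lemma pvChunks_nil_iff (p : String → Bool) (xs : List String) :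
    pvChunks p xs = [] ↔ xs = [] := by
  cases xs <;> simp [pvChunks]

-- ===== generic enumerate/filter selection lemmas =====

lemma pvEnumKeep {α : Type} (xs : List α) (s : Int) (q : Int × α → Bool)
    (h : ∀ (k : Nat), k < xs.length → ∀ (hk : k < xs.length), q (s + k, xs[k]) = true) :
    (PySem.List.enumerate xs s).filter q = PySem.List.enumerate xs s := by
  apply List.filter_eq_self.mpr
  intro pr hpr
  obtain ⟨k, hk, rfl⟩ := (PySem.List.mem_enumerate_iff xs s pr).mp hpr
  exact h k hk hk

lemma pvEnumDrop {α : Type} (xs : List α) (s : Int) (q : Int × α → Bool)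
    (h : ∀ (k : Nat), ∀ (hk : k < xs.length), q (s + k, xs[k]) = false) :
    (PySem.List.enumerate xs s).filter q = [] := by
  apply List.filter_eq_nil_iff.mpr
  intro pr hpr
  obtain ⟨k, hk, rfl⟩ := (PySem.List.mem_enumerate_iff xs s pr).mp hpr
  simp [h k hk]

lemma pvEnumSndMap {α : Type} (g : α → Bool) : ∀ (xs : List α) (s : Int),
    ((PySem.List.enumerate xs s).filter (fun q => g q.2)).map (·.2) = xs.filter g := by
  intro xs
  induction xs with
  | nil => intro s; simp [PySem.List.enumerate]
  | cons x xs ih =>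
    intro s
    rw [PySem.List.enumerate_cons]
    by_cases hx : g x <;> simp [hx, ih (s + 1)]

lemma pvEnumCongrSnd {α : Type} (xs : List α) (s : Int) (q : Int × α → Bool) (g : α → Bool)
    (h : ∀ (k : Nat), ∀ (hk : k < xs.length), q (s + k, xs[k]) = g xs[k]) :
    ((PySem.List.enumerate xs s).filter q).map (·.2) = xs.filter g := by
  have hc : List.filter q (PySem.List.enumerate xs s) =
      List.filter (fun pr => g pr.2) (PySem.List.enumerate xs s) := by
    apply List.filter_congr
    intro pr hpr
    obtain ⟨k, hk, rfl⟩ := (PySem.List.mem_enumerate_iff xs s pr).mp hpr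
    exact h k hk
  rw [hc]
  exact pvEnumSndMap g xs s

lemma pvEnumKeepMap {α : Type} (xs : List α) (s : Int) (q : Int × α → Bool)
    (h : ∀ (k : Nat), ∀ (hk : k < xs.length), q (s + k, xs[k]) = true) :
    ((PySem.List.enumerate xs s).filter q).map (·.2) = xs := by
  rw [pvEnumKeep xs s q (fun k _ hk => h k hk)]
  exact PySem.List.map_snd_enumerate xs s

-- ===== boundary positions =====

def pvMarkpos (s : Int) : List (List String) → List Int
  | [] => []
  | c :: cs => s :: pvMarkpos (s + (c.length : Int)) cs

lemma pvMarks_flatten (p : String → Bool) : ∀ (cs : List (List String)) (s : Int),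
    pvShaped p cs →
    ((PySem.List.enumerate cs.flatten s).filter (fun q => p q.2)).map (·.1) = pvMarkpos s cs := by
  intro cs
  induction cs with
  | nil => intro s _; simp [pvMarkpos]
  | cons c cs ih =>
    intro s hs
    obtain ⟨hd, t, rfl, hp, ht⟩ := hs (c := c) (List.mem_cons_self ..)
    have hcs : pvShaped p cs := fun c hc => hs c (List.mem_cons_of_mem _ hc)
    rw [List.flatten_cons, PySem.List.enumerate_append, List.filter_append, List.map_append,
      ih _ hcs, PySem.List.enumerate_cons, List.filter_cons]
    simp only [hp]
    have hdrop : (PySem.List.enumerate t (s + 1)).filter (fun q => p q.2) = [] := by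
      apply pvEnumDrop
      intro k hk
      simp [ht t[k] (t.getElem_mem hk)]
    rw [hdrop]
    simp [pvMarkpos]

lemma pvMarksB_eq (p : String → Bool) (lines : List String) :
    pvMarksB p lines =
      pvMarkpos ((lines.takeWhile (fun x => !p x)).length : Int)
        (pvChunks p (lines.dropWhile (fun x => !p x))) := by
  unfold pvMarksB
  have hshape : pvShaped p (pvChunks p (lines.dropWhile (fun x => !p x))) := by
    apply pvChunks_shaped
    intro a as ha
    have := List.head?_dropWhile_not (fun x => !p x) lines
    rw [ha] at this
    simpa using this
  conv_lhs => rw [show lines = lines.takeWhile (fun x => !p x) ++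
      (pvChunks p (lines.dropWhile (fun x => !p x))).flatten by
    rw [pvChunks_flatten]
    exact (List.takeWhile_append_dropWhile).symm]
  rw [PySem.List.enumerate_append, List.filter_append, List.map_append]
  have hpre : (PySem.List.enumerate (lines.takeWhile (fun x => !p x)) 0).filter
      (fun q => p q.2) = [] := by
    apply pvEnumDrop
    intro k hk
    have := List.mem_takeWhile_imp ((lines.takeWhile (fun x => !p x)).getElem_mem hk)
    simpa using this
  rw [hpre]
  simpa using pvMarks_flatten p _ _ hshape

-- ===== A-side characterizations =====

lemma pvHeaderScanA_eq : ∀ lines : List String,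
    pvHeaderScanA lines =
      (lines.takeWhile (fun x => !pvIsDiff x),
       if lines.dropWhile (fun x => !pvIsDiff x) = [] then none
       else some (lines.dropWhile (fun x => !pvIsDiff x))) := by
  intro lines
  induction lines with
  | nil => simp [pvHeaderScanA]
  | cons l ls ih =>
    by_cases hl : pvIsDiff l
    · simp [pvHeaderScanA, hl, List.takeWhile_cons, List.dropWhile_cons]
    · simp only [pvHeaderScanA, hl, if_neg, Bool.false_eq_true, not_false_eq_true, ih,
        List.takeWhile_cons, List.dropWhile_cons]
      simp [hl]

lemma pvFileLoopA_eq (h : List String) : ∀ (rest cur patches : List String), cur ≠ [] →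
    pvFileLoopA h patches cur rest =
      patches ++ (((cur ++ rest.takeWhile (fun x => !pvIsDiff x)) ::
          pvChunks pvIsDiff (rest.dropWhile (fun x => !pvIsDiff x))).map
        (fun c => PySem.Str.join "\n" (h ++ c))) := by
  intro rest
  induction rest with
  | nil =>
    intro cur patches hcur
    simp [pvFileLoopA, List.isEmpty_iff, hcur, pvChunks]
  | cons r rs ih =>
    intro cur patches hcur
    by_cases hr : pvIsDiff r
    · rw [pvFileLoopA, if_pos (by simp [hr, List.isEmpty_iff, hcur]),
        ih [r] _ (by simp)]
      simp [List.takeWhile_cons, List.dropWhile_cons, hr, pvChunks]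
    · rw [pvFileLoopA, if_neg (by simp [hr]), ih (cur ++ [r]) _ (by simp)]
      simp [List.takeWhile_cons, List.dropWhile_cons, hr]

lemma pvByFileA_eq (pc : String) :
    pvByFileA pc =
      (let lines := pvLines pc
       let dw := lines.dropWhile (fun x => !pvIsDiff x)
       if dw = [] then [pc]
       else (pvChunks pvIsDiff dw).map
         (fun c => PySem.Str.join "\n" (lines.takeWhile (fun x => !pvIsDiff x) ++ c))) := by
  unfold pvByFileA
  simp only [pvHeaderScanA_eq]
  by_cases hdw : (pvLines pc).dropWhile (fun x => !pvIsDiff x) = []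
  · simp [hdw]
  · simp only [hdw, if_neg, reduceIte]
    obtain ⟨l, ls, hls⟩ := List.exists_cons_of_ne_nil hdw
    have hl : pvIsDiff l = true := by
      have := List.head?_dropWhile_not (fun x => !pvIsDiff x) (pvLines pc)
      rw [hls] at this
      simpa using this
    rw [hls, pvFileLoopA]
    rw [if_neg (by simp), List.nil_append, pvFileLoopA_eq _ ls [l] [] (by simp)]
    simp [pvChunks, hl]

-- running-header spec of the hunk splitter over chunks
def pvHspec : List String → List (List String) → List (List String)
  | _, [] => []
  | acc, c :: cs =>
      ((acc ++ c.filter pvIsHdr) ++ c.filter (fun l => !pvIsHdr l)) ::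
        pvHspec (acc ++ c.filter pvIsHdr) cs

lemma pvHunkLoopA_patches : ∀ (rest patches fhdr cur : List String),
    pvHunkLoopA patches fhdr cur rest = patches ++ pvHunkLoopA [] fhdr cur rest := by
  intro rest
  induction rest with
  | nil =>
    intro patches fhdr cur
    by_cases hc : cur.isEmpty <;> simp [pvHunkLoopA, hc]
  | cons l ls ih =>
    intro patches fhdr cur
    rw [pvHunkLoopA, pvHunkLoopA]
    by_cases h1 : pvIsHdr l
    · simp only [h1, reduceIte]
      exact ih ..
    · simp only [h1, Bool.false_eq_true, reduceIte]
      by_cases h2 : pvIsAt l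
      · simp only [h2, reduceIte]
        by_cases hc : cur.isEmpty
        · simp only [hc, reduceIte]
          exact ih ..
        · simp only [hc, Bool.false_eq_true, reduceIte]
          rw [ih (patches ++ _), ih ([] ++ _)]
          simp
      · simp only [h2, Bool.false_eq_true, reduceIte]
        by_cases hc : !cur.isEmpty <;> simp only [hc, Bool.false_eq_true, reduceIte] <;>
          exact ih ..

lemma pvHunkA_skip : ∀ (t : List String) (fhdr X : List String),
    (∀ x ∈ t, pvIsAt x = false) →
    pvHunkLoopA [] fhdr [] (t ++ X) = pvHunkLoopA [] (fhdr ++ t.filter pvIsHdr) [] X := by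
  intro t
  induction t with
  | nil => intro fhdr X _; simp
  | cons l ls ih =>
    intro fhdr X hat
    have hat' : ∀ x ∈ ls, pvIsAt x = false := fun x hx => hat x (List.mem_cons_of_mem _ hx)
    have hl : pvIsAt l = false := hat l (List.mem_cons_self ..)
    rw [List.cons_append, pvHunkLoopA]
    by_cases h1 : pvIsHdr l
    · rw [if_pos h1, ih _ _ hat']
      simp [List.filter_cons, h1]
    · rw [if_neg (by simp [h1]), if_neg (by simp [hl]), if_neg (by simp), ih _ _ hat']
      simp [List.filter_cons, h1]

lemma pvHunkA_incur : ∀ (t : List String) (fhdr cur X : List String), cur ≠ [] →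
    (∀ x ∈ t, pvIsAt x = false) →
    pvHunkLoopA [] fhdr cur (t ++ X) =
      pvHunkLoopA [] (fhdr ++ t.filter pvIsHdr) (cur ++ t.filter (fun l => !pvIsHdr l)) X := by
  intro t
  induction t with
  | nil => intro fhdr cur X _ _; simp
  | cons l ls ih =>
    intro fhdr cur X hcur hat
    have hat' : ∀ x ∈ ls, pvIsAt x = false := fun x hx => hat x (List.mem_cons_of_mem _ hx)
    have hl : pvIsAt l = false := hat l (List.mem_cons_self ..)
    rw [List.cons_append, pvHunkLoopA]
    by_cases h1 : pvIsHdr l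
    · rw [if_pos h1, ih _ _ _ hcur hat']
      simp [List.filter_cons, h1]
    · rw [if_neg (by simp [h1]), if_neg (by simp [hl]),
        if_pos (by simp [List.isEmpty_iff, hcur]), ih _ _ _ (by simp) hat']
      simp [List.filter_cons, h1]

lemma pvHunkA_chunks : ∀ (cs : List (List String)) (fhdr cur : List String),
    pvShaped pvIsAt cs → cur ≠ [] →
    pvHunkLoopA [] fhdr cur cs.flatten =
      PySem.Str.join "\n" (fhdr ++ cur) :: (pvHspec fhdr cs).map (PySem.Str.join "\n") := by
  intro cs
  induction cs with
  | nil =>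
    intro fhdr cur _ hcur
    simp [pvHunkLoopA, pvHspec, List.isEmpty_iff, hcur]
  | cons c cs ih =>
    intro fhdr cur hs hcur
    obtain ⟨hd, t, rfl, hp, ht⟩ := hs (c := c) (List.mem_cons_self ..)
    have hcs : pvShaped pvIsAt cs := fun c hc => hs c (List.mem_cons_of_mem _ hc)
    have hhd : pvIsHdr hd = false := pvIsAt_not_hdr hd hp
    rw [List.flatten_cons, List.cons_append, pvHunkLoopA]
    rw [if_neg (by simp [hhd]), if_pos hp, if_neg (by simp [List.isEmpty_iff, hcur])]
    rw [pvHunkLoopA_patches, pvHunkA_incur t _ _ _ (by simp) ht, ih _ _ hcs (by simp)]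
    simp only [pvHspec, List.map_cons, List.filter_cons, hhd, Bool.false_eq_true,
      Bool.not_false, reduceIte]
    simp

lemma pvHunkA_start (cs : List (List String)) (fhdr : List String) (hs : pvShaped pvIsAt cs) :
    pvHunkLoopA [] fhdr [] cs.flatten = (pvHspec fhdr cs).map (PySem.Str.join "\n") := by
  match cs with
  | [] => simp [pvHunkLoopA, pvHspec]
  | c :: cs' =>
    obtain ⟨hd, t, rfl, hp, ht⟩ := hs (c := c) (List.mem_cons_self ..)
    have hcs : pvShaped pvIsAt cs' := fun c hc => hs c (List.mem_cons_of_mem _ hc)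
    have hhd : pvIsHdr hd = false := pvIsAt_not_hdr hd hp
    rw [List.flatten_cons, List.cons_append, pvHunkLoopA]
    rw [if_neg (by simp [hhd]), if_pos hp, if_pos (by simp)]
    rw [pvHunkA_incur t _ _ _ (by simp) ht, pvHunkA_chunks cs' _ _ hcs (by simp)]
    simp only [pvHspec, List.map_cons, List.filter_cons, hhd, Bool.false_eq_true,
      Bool.not_false, reduceIte]
    simp

lemma pvByHunkA_eq (pc : String) :
    pvByHunkA pc =
      (pvHspec ((pvLines pc).takeWhile (fun x => !pvIsAt x) |>.filter pvIsHdr)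
        (pvChunks pvIsAt ((pvLines pc).dropWhile (fun x => !pvIsAt x)))).map
        (PySem.Str.join "\n") := by
  unfold pvByHunkA
  have hshape : pvShaped pvIsAt (pvChunks pvIsAt ((pvLines pc).dropWhile (fun x => !pvIsAt x))) := by
    apply pvChunks_shaped
    intro a as ha
    have := List.head?_dropWhile_not (fun x => !pvIsAt x) (pvLines pc)
    rw [ha] at this
    simpa using this
  conv_lhs => rw [show pvLines pc = (pvLines pc).takeWhile (fun x => !pvIsAt x) ++
      (pvChunks pvIsAt ((pvLines pc).dropWhile (fun x => !pvIsAt x))).flatten by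
    rw [pvChunks_flatten]
    exact (List.takeWhile_append_dropWhile).symm]
  rw [pvHunkA_skip _ _ _ (fun x hx => by
    have := List.mem_takeWhile_imp hx
    simpa using this)]
  simpa using pvHunkA_start _ _ hshape

-- ===== B-side characterizations =====

-- selection of an index interval out of enumerate
lemma pvSelBody (pre c rest : List String) :
    ((PySem.List.enumerate (pre ++ (c ++ rest))).filter
        (fun q => decide ((pre.length : Int) ≤ q.1) &&
          decide (q.1 < (pre.length : Int) + (c.length : Int)))).map (·.2) = c := by
  rw [PySem.List.enumerate_append, PySem.List.enumerate_append, List.filter_append,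
    List.filter_append, List.map_append, List.map_append]
  rw [pvEnumDrop pre 0 _ (fun k hk => by
    have h1 : ¬ ((pre.length : Int) ≤ 0 + (k : Int)) := by omega
    simp [h1] <;> (intros; omega))]
  rw [pvEnumKeepMap c (0 + (pre.length : Int)) _ (fun k hk => by
    have h1 : (pre.length : Int) ≤ 0 + (pre.length : Int) + (k : Int) := by omega
    have h2 : 0 + (pre.length : Int) + (k : Int) < (pre.length : Int) + (c.length : Int) := by
      omega
    simp [h1, h2] <;> (intros; omega))]
  rw [pvEnumDrop rest (0 + (pre.length : Int) + (c.length : Int)) _ (fun k hk => by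
    have h2 : ¬ (0 + (pre.length : Int) + (c.length : Int) + (k : Int) <
        (pre.length : Int) + (c.length : Int)) := by omega
    simp [h2] <;> (intros; omega))]
  simp

lemma pvSelHead (pre rest : List String) :
    ((PySem.List.enumerate (pre ++ rest)).filter
        (fun q => decide (q.1 < (pre.length : Int)))).map (·.2) = pre := by
  rw [PySem.List.enumerate_append, List.filter_append, List.map_append]
  rw [pvEnumKeepMap pre 0 _ (fun k hk => by
    have h1 : 0 + (k : Int) < (pre.length : Int) := by omega
    simp [h1] <;> (intros; omega))]
  rw [pvEnumDrop rest (0 + (pre.length : Int)) _ (fun k hk => by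
    have h1 : ¬ (0 + (pre.length : Int) + (k : Int) < (pre.length : Int)) := by omega
    simp [h1] <;> (intros; omega))]
  simp

lemma pvSelHdr (pre c rest : List String) :
    ((PySem.List.enumerate (pre ++ (c ++ rest))).filter
        (fun q => decide (q.1 < (pre.length : Int) + (c.length : Int)) && pvIsHdr q.2)).map (·.2)
      = pre.filter pvIsHdr ++ c.filter pvIsHdr := by
  rw [PySem.List.enumerate_append, PySem.List.enumerate_append, List.filter_append,
    List.filter_append, List.map_append, List.map_append]
  rw [pvEnumCongrSnd pre 0 _ pvIsHdr (fun k hk => by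
    have h1 : 0 + (k : Int) < (pre.length : Int) + (c.length : Int) := by omega
    simp [h1] <;> (intros; omega))]
  rw [pvEnumCongrSnd c (0 + (pre.length : Int)) _ pvIsHdr (fun k hk => by
    have h1 : 0 + (pre.length : Int) + (k : Int) < (pre.length : Int) + (c.length : Int) := by
      omega
    simp [h1] <;> (intros; omega))]
  rw [pvEnumDrop rest (0 + (pre.length : Int) + (c.length : Int)) _ (fun k hk => by
    have h1 : ¬ (0 + (pre.length : Int) + (c.length : Int) + (k : Int) <
        (pre.length : Int) + (c.length : Int)) := by omega
    simp [h1] <;> (intros; omega))]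
  simp

lemma pvSelBodyNotHdr (pre c rest : List String) :
    ((PySem.List.enumerate (pre ++ (c ++ rest))).filter
        (fun q => decide ((pre.length : Int) ≤ q.1) &&
          decide (q.1 < (pre.length : Int) + (c.length : Int)) && !pvIsHdr q.2)).map (·.2)
      = c.filter (fun l => !pvIsHdr l) := by
  rw [PySem.List.enumerate_append, PySem.List.enumerate_append, List.filter_append,
    List.filter_append, List.map_append, List.map_append]
  rw [pvEnumDrop pre 0 _ (fun k hk => by
    have h1 : ¬ ((pre.length : Int) ≤ 0 + (k : Int)) := by omega
    simp [h1] <;> (intros; omega))]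
  rw [pvEnumCongrSnd c (0 + (pre.length : Int)) _ (fun l => !pvIsHdr l) (fun k hk => by
    have h1 : (pre.length : Int) ≤ 0 + (pre.length : Int) + (k : Int) := by omega
    have h2 : 0 + (pre.length : Int) + (k : Int) < (pre.length : Int) + (c.length : Int) := by
      omega
    simp [h1, h2] <;> (intros; omega))]
  rw [pvEnumDrop rest (0 + (pre.length : Int) + (c.length : Int)) _ (fun k hk => by
    have h2 : ¬ (0 + (pre.length : Int) + (c.length : Int) + (k : Int) <
        (pre.length : Int) + (c.length : Int)) := by omega
    simp [h2] <;> (intros; omega))]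
  simp

lemma pvZfile : ∀ (cs : List (List String)) (pre hdr : List String),
    ((pvMarkpos (pre.length : Int) cs).zip
        ((pvMarkpos (pre.length : Int) cs).tail ++ [((pre ++ cs.flatten).length : Int)])).map
      (fun se => PySem.Str.join "\n"
        (hdr ++ ((PySem.List.enumerate (pre ++ cs.flatten)).filter
            (fun q => decide (se.1 ≤ q.1) && decide (q.1 < se.2))).map (·.2)))
    = cs.map (fun c => PySem.Str.join "\n" (hdr ++ c)) := by
  intro cs
  induction cs with
  | nil => intro pre hdr; simp [pvMarkpos]
  | cons c cs ih =>
    intro pre hdr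
    have hassoc : pre ++ (c :: cs).flatten = (pre ++ c) ++ cs.flatten := by
      rw [List.flatten_cons, List.append_assoc]
    have hflat : pre ++ (c :: cs).flatten = pre ++ (c ++ cs.flatten) := by
      rw [List.flatten_cons]
    have hlen : ((pre ++ (c :: cs).flatten).length : Int) =
        (((pre ++ c) ++ cs.flatten).length : Int) := by rw [hassoc]
    have hcast : (pre.length : Int) + (c.length : Int) = (((pre ++ c).length : Nat) : Int) := by
      simp
    cases cs with
    | nil =>
      have hn : ((pre ++ (c :: ([] : List (List String))).flatten).length : Int) =
          (pre.length : Int) + (c.length : Int) := by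
        simp
      rw [pvMarkpos, pvMarkpos]
      simp only [List.tail_cons, List.nil_append, List.zip_cons_cons, List.zip_nil_right,
        List.map_cons, List.map_nil]
      rw [hn, hflat, pvSelBody]
    | cons c2 cs2 =>
      have hM : pvMarkpos ((pre.length : Int) + (c.length : Int)) (c2 :: cs2) =
          ((pre.length : Int) + (c.length : Int)) ::
            pvMarkpos ((pre.length : Int) + (c.length : Int) + (c2.length : Int)) cs2 := rfl
      rw [pvMarkpos, hM]
      simp only [List.tail_cons, List.cons_append, List.zip_cons_cons, List.map_cons]
      congr 1
      · rw [hflat, pvSelBody]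
      · rw [← hM,
          show pvMarkpos ((pre.length : Int) + (c.length : Int) + (c2.length : Int)) cs2 =
            (pvMarkpos ((pre.length : Int) + (c.length : Int)) (c2 :: cs2)).tail from rfl,
          hcast, hlen, hassoc]
        exact ih (pre ++ c) hdr

lemma pvZhunk : ∀ (cs : List (List String)) (pre : List String),
    ((pvMarkpos (pre.length : Int) cs).zip
        ((pvMarkpos (pre.length : Int) cs).tail ++ [((pre ++ cs.flatten).length : Int)])).map
      (fun se => PySem.Str.join "\n"
        (((PySem.List.enumerate (pre ++ cs.flatten)).filter
            (fun q => decide (q.1 < se.2) && pvIsHdr q.2)).map (·.2) ++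
         ((PySem.List.enumerate (pre ++ cs.flatten)).filter
            (fun q => decide (se.1 ≤ q.1) && decide (q.1 < se.2) && !pvIsHdr q.2)).map (·.2)))
    = (pvHspec (pre.filter pvIsHdr) cs).map (PySem.Str.join "\n") := by
  intro cs
  induction cs with
  | nil => intro pre; simp [pvMarkpos, pvHspec]
  | cons c cs ih =>
    intro pre
    have hassoc : pre ++ (c :: cs).flatten = (pre ++ c) ++ cs.flatten := by
      rw [List.flatten_cons, List.append_assoc]
    have hflat : pre ++ (c :: cs).flatten = pre ++ (c ++ cs.flatten) := by
      rw [List.flatten_cons]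
    have hlen : ((pre ++ (c :: cs).flatten).length : Int) =
        (((pre ++ c) ++ cs.flatten).length : Int) := by rw [hassoc]
    have hcast : (pre.length : Int) + (c.length : Int) = (((pre ++ c).length : Nat) : Int) := by
      simp
    have hacc : (pre ++ c).filter pvIsHdr = pre.filter pvIsHdr ++ c.filter pvIsHdr :=
      List.filter_append ..
    cases cs with
    | nil =>
      have hn : ((pre ++ (c :: ([] : List (List String))).flatten).length : Int) =
          (pre.length : Int) + (c.length : Int) := by
        simp
      rw [pvMarkpos, pvMarkpos]
      simp only [List.tail_cons, List.nil_append, List.zip_cons_cons, List.zip_nil_right,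
        List.map_cons, List.map_nil, pvHspec]
      rw [hn, hflat, pvSelHdr, pvSelBodyNotHdr]
    | cons c2 cs2 =>
      have hM : pvMarkpos ((pre.length : Int) + (c.length : Int)) (c2 :: cs2) =
          ((pre.length : Int) + (c.length : Int)) ::
            pvMarkpos ((pre.length : Int) + (c.length : Int) + (c2.length : Int)) cs2 := rfl
      rw [pvMarkpos, hM, pvHspec]
      simp only [List.tail_cons, List.cons_append, List.zip_cons_cons, List.map_cons]
      congr 1
      · rw [hflat, pvSelHdr, pvSelBodyNotHdr]
      · rw [← hM,
          show pvMarkpos ((pre.length : Int) + (c.length : Int) + (c2.length : Int)) cs2 =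
            (pvMarkpos ((pre.length : Int) + (c.length : Int)) (c2 :: cs2)).tail from rfl,
          hcast, hlen, hassoc]
        rw [show pvHspec (pre.filter pvIsHdr ++ c.filter pvIsHdr) (c2 :: cs2) =
          pvHspec ((pre ++ c).filter pvIsHdr) (c2 :: cs2) from by rw [hacc]]
        exact ih (pre ++ c)

lemma pvByFileB_eq (pc : String) : pvByFileB pc = pvByFileA pc := by
  rw [pvByFileA_eq]
  unfold pvByFileB
  simp only [pvMarksB_eq pvIsDiff]
  have hdecomp : pvLines pc = (pvLines pc).takeWhile (fun x => !pvIsDiff x) ++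
      (pvChunks pvIsDiff ((pvLines pc).dropWhile (fun x => !pvIsDiff x))).flatten := by
    rw [pvChunks_flatten]
    exact (List.takeWhile_append_dropWhile).symm
  cases hcs : pvChunks pvIsDiff ((pvLines pc).dropWhile (fun x => !pvIsDiff x)) with
  | nil =>
    have : (pvLines pc).dropWhile (fun x => !pvIsDiff x) = [] :=
      (pvChunks_nil_iff _ _).mp hcs
    simp [pvMarkpos, hcs, this]
  | cons c cs =>
    have hdw : ¬ (pvLines pc).dropWhile (fun x => !pvIsDiff x) = [] := by
      intro h
      rw [h] at hcs
      simp [pvChunks] at hcs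
    rw [hcs] at hdecomp
    simp only [hcs, if_neg hdw, pvMarkpos]
    set tw := (pvLines pc).takeWhile (fun x => !pvIsDiff x) with htw
    rw [hdecomp, pvSelHead]
    rw [show ((tw.length : Int) :: pvMarkpos ((tw.length : Int) + (c.length : Int)) cs) =
          pvMarkpos (tw.length : Int) (c :: cs) from rfl,
      show pvMarkpos ((tw.length : Int) + (c.length : Int)) cs =
          (pvMarkpos (tw.length : Int) (c :: cs)).tail from rfl]
    exact pvZfile (c :: cs) tw tw

lemma pvByHunkB_eq (pc : String) : pvByHunkB pc = pvByHunkA pc := by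
  rw [pvByHunkA_eq]
  unfold pvByHunkB
  simp only [pvMarksB_eq pvIsAt]
  have hdecomp : pvLines pc = (pvLines pc).takeWhile (fun x => !pvIsAt x) ++
      (pvChunks pvIsAt ((pvLines pc).dropWhile (fun x => !pvIsAt x))).flatten := by
    rw [pvChunks_flatten]
    exact (List.takeWhile_append_dropWhile).symm
  set cst := pvChunks pvIsAt ((pvLines pc).dropWhile (fun x => !pvIsAt x)) with hcst
  set tw := (pvLines pc).takeWhile (fun x => !pvIsAt x) with htw
  rw [hdecomp]
  exact pvZhunk cst tw

-- ===== VERDICT (by name: the statement is the Claim_ definition above) =====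
theorem split_patch_by_size_py_spec : Claim_equal_split_patch_by_size_py := by
  intro pc ms _
  unfold Spec_split_patch_by_size_py split_patch_by_size_py split_patch_by_size_py_alt
  rw [pvByFileB_eq]
  split
  · rfl
  · generalize pvByFileA pc = l
    suffices h : ∀ (acc : List String),
        l.foldl (fun acc fp =>
          if (PySem.Str.len fp : Int) ≤ ms then acc ++ [fp] else acc ++ pvByHunkA fp) acc =
        l.foldl (fun parts fp =>
          parts ++ (if (PySem.Str.len fp : Int) ≤ ms then [fp] else pvByHunkB fp)) acc by
      exact h []
    induction l with
    | nil => intro acc; rfl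
    | cons x xs ih =>
      intro acc
      simp only [List.foldl_cons]
      rw [pvByHunkB_eq]
      split <;> exact ih _
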